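-- pv_equiv track=rewrite | github.com/alexisduhamel/touchdowntracker | touchdowntracker.py | updateTeamStats
-- ===== SOURCE A (Python) =====
-- def updateTeamStats(players_dict, stats_dict):
--     """
--     Aggregate player statistics into team statistics.
--     Returns a dictionary of team stats, sorted by performance.
--     """
--     team_stats = {}
--     for player, pdata in players_dict.items():
--         team = pdata.get('Team', None)
--         if not team:
--             continue
--         pstats = stats_dict.get(player, {})
--         if team not in team_stats:
--             team_stats[team] = {
--                 'points': 0,
--                 'touchdowns': 0,
--                 'wins': 0,
--                 'draws': 0,
--                 'losses': 0
--             }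
--         team_stats[team]['points'] += pstats.get('points', 0)
--         team_stats[team]['wins'] += pstats.get('wins', 0)
--         team_stats[team]['draws'] += pstats.get('draws', 0)
--         team_stats[team]['losses'] += pstats.get('losses', 0)
--         team_stats[team]['touchdowns'] += pstats.get('touchdowns', 0)
--
--     # Sort teams by points, wins, draws, touchdowns (descending)
--     sorted_teams = sorted(
--         team_stats.items(),
--         key=lambda x: (
--             x[1]['points'],
--             x[1]['wins'],
--             x[1]['draws'],
--             x[1]['touchdowns']
--         ),
--         reverse=True
--     )
--     return dict(sorted_teams)
-- ===== SOURCE B (Python) =====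
-- def updateTeamStats(players_dict, stats_dict):
--     """
--     Aggregate player statistics into team statistics.
--     Returns a dictionary of team stats, sorted by performance.
--     Two-pass version: first group each player's stats under their team
--     (first-appearance team order), then reduce each group into the five
--     totals, then sort.
--     """
--     groups = {}
--     for player, pdata in players_dict.items():
--         team = pdata.get('Team')
--         if not team:
--             continue
--         groups.setdefault(team, []).append(stats_dict.get(player, {}))
--     team_stats = {
--         team: {key: sum(ps.get(key, 0) for ps in plist)
--                for key in ('points', 'touchdowns', 'wins', 'draws', 'losses')}
--         for team, plist in groups.items()
--     }
--     return dict(sorted(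
--         team_stats.items(),
--         key=lambda x: (x[1]['points'], x[1]['wins'], x[1]['draws'], x[1]['touchdowns']),
--         reverse=True
--     ))
-- ===== Notes on version B (the rewrite author's own statement) =====
-- stated objective: alternative
-- what changed: B separates grouping from aggregation: one pass builds a team -> list-of-player-stats index in first-appearance order, a second pass reduces each group into the five totals via comprehensions and sum(), instead of A's single pass that initialises and increments five running counters inline.
import Mathlib
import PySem

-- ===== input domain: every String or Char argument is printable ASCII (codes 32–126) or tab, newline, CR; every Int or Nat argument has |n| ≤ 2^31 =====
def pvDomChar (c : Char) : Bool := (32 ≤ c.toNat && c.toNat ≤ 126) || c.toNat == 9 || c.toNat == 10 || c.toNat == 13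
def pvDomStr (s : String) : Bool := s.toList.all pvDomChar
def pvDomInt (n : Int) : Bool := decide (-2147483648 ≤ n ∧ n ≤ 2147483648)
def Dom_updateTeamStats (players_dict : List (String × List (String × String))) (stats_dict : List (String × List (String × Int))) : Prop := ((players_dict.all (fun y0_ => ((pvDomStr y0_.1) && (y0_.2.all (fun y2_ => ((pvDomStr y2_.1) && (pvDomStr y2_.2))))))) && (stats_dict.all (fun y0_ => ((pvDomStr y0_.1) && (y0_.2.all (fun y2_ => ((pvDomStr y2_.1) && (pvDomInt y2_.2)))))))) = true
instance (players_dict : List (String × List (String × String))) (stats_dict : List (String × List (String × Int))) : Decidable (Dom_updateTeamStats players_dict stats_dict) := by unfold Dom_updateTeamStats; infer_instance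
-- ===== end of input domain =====

-- B groups each player's stats under their team first (first-appearance order) and reduces each
-- group to the five totals in a second pass, instead of A's inline five-counter accumulation;
-- same cost, different decomposition ("alternative").

-- ===== PORT A =====
-- body of A's 'for player, pdata in players_dict.items()' loop
def updateTeamStats_loop (stats_dict : List (String × List (String × Int)))
    (ts : PySem.Dict String (PySem.Dict String Int)) (pp : String × List (String × String)) :
    PySem.Dict String (PySem.Dict String Int) :=
  match (PySem.Dict.mk pp.2).get? "Team" with
  | none => ts
  | some team =>
    if team = "" then ts
    else
      let pstats : PySem.Dict String Int := PySem.Dict.mk ((PySem.Dict.mk stats_dict).getD pp.1 [])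
      let ts := if ts.contains team then ts else
        ts.insert team (PySem.Dict.mk [("points", 0), ("touchdowns", 0), ("wins", 0), ("draws", 0), ("losses", 0)])
      let ts := ts.modify team PySem.Dict.empty (fun d => d.modify "points" 0 (· + pstats.getD "points" 0))
      let ts := ts.modify team PySem.Dict.empty (fun d => d.modify "wins" 0 (· + pstats.getD "wins" 0))
      let ts := ts.modify team PySem.Dict.empty (fun d => d.modify "draws" 0 (· + pstats.getD "draws" 0))
      let ts := ts.modify team PySem.Dict.empty (fun d => d.modify "losses" 0 (· + pstats.getD "losses" 0))
      ts.modify team PySem.Dict.empty (fun d => d.modify "touchdowns" 0 (· + pstats.getD "touchdowns" 0))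

def updateTeamStats (players_dict : List (String × List (String × String))) (stats_dict : List (String × List (String × Int))) : List (String × List (String × Int)) :=
  let team_stats := players_dict.foldl (updateTeamStats_loop stats_dict) PySem.Dict.empty
  let sorted_teams := PySem.List.sorted team_stats.items
    (fun x => toLex (x.2.getD "points" 0, toLex (x.2.getD "wins" 0, toLex (x.2.getD "draws" 0, x.2.getD "touchdowns" 0)))) true
  (PySem.Dict.ofList sorted_teams).items.map (fun p => (p.1, p.2.items))

-- ===== PORT B =====
-- body of B's grouping loop: groups.setdefault(team, []).append(stats_dict.get(player, {}))
def updateTeamStats_alt_loop (stats_dict : List (String × List (String × Int)))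
    (g : PySem.Dict String (List (PySem.Dict String Int))) (pp : String × List (String × String)) :
    PySem.Dict String (List (PySem.Dict String Int)) :=
  match (PySem.Dict.mk pp.2).get? "Team" with
  | none => g
  | some team =>
    if team = "" then g
    else g.modify team [] (fun l => l ++ [PySem.Dict.mk ((PySem.Dict.mk stats_dict).getD pp.1 [])])

def updateTeamStats_alt (players_dict : List (String × List (String × String))) (stats_dict : List (String × List (String × Int))) : List (String × List (String × Int)) :=
  let groups := players_dict.foldl (updateTeamStats_alt_loop stats_dict) PySem.Dict.empty
  let team_stats : List (String × List (String × Int)) :=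
    groups.items.map (fun tp => (tp.1,
      ["points", "touchdowns", "wins", "draws", "losses"].map
        (fun k => (k, (tp.2.map (fun ps => ps.getD k 0)).sum))))
  let sorted_teams := PySem.List.sorted team_stats
    (fun x => toLex ((PySem.Dict.mk x.2).getD "points" 0, toLex ((PySem.Dict.mk x.2).getD "wins" 0,
      toLex ((PySem.Dict.mk x.2).getD "draws" 0, (PySem.Dict.mk x.2).getD "touchdowns" 0)))) true
  (PySem.Dict.ofList sorted_teams).items

-- ===== PRECONDITION & SPEC =====
def Spec_updateTeamStats (players_dict : List (String × List (String × String))) (stats_dict : List (String × List (String × Int))) (out : List (String × List (String × Int))) : Prop := out = updateTeamStats_alt players_dict stats_dict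
instance (players_dict : List (String × List (String × String))) (stats_dict : List (String × List (String × Int))) (out : List (String × List (String × Int))) : Decidable (Spec_updateTeamStats players_dict stats_dict out) := by unfold Spec_updateTeamStats; infer_instance

-- ===== CLAIM (what is proved, stated in full; the proofs are below) =====
def Claim_equal_updateTeamStats : Prop := ∀ (players_dict : List (String × List (String × String))) (stats_dict : List (String × List (String × Int))), Dom_updateTeamStats players_dict stats_dict → Spec_updateTeamStats players_dict stats_dict (updateTeamStats players_dict stats_dict)

-- ===== LEMMAS AND PROOFS =====

-- the initial inner stats dict A creates for a new team
def pvInitD : PySem.Dict String Int :=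
  PySem.Dict.mk [("points", 0), ("touchdowns", 0), ("wins", 0), ("draws", 0), ("losses", 0)]

-- A's five in-place increments, as one function on the inner dict
def pvAdd (d : PySem.Dict String Int) (ps : PySem.Dict String Int) : PySem.Dict String Int :=
  ((((d.modify "points" 0 (· + ps.getD "points" 0)).modify "wins" 0 (· + ps.getD "wins" 0)).modify
      "draws" 0 (· + ps.getD "draws" 0)).modify "losses" 0 (· + ps.getD "losses" 0)).modify
    "touchdowns" 0 (· + ps.getD "touchdowns" 0)

-- the (team, player-stats) contribution of one players_dict entry, if any
def pvExt (stats_dict : List (String × List (String × Int))) (pp : String × List (String × String)) :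
    Option (String × PySem.Dict String Int) :=
  match (PySem.Dict.mk pp.2).get? "Team" with
  | none => none
  | some t => if t = "" then none
      else some (t, PySem.Dict.mk ((PySem.Dict.mk stats_dict).getD pp.1 []))

-- A's loop body on one contribution
def pvStepA (ts : PySem.Dict String (PySem.Dict String Int)) (q : String × PySem.Dict String Int) :
    PySem.Dict String (PySem.Dict String Int) :=
  let ts := if ts.contains q.1 then ts else ts.insert q.1 pvInitD
  let ts := ts.modify q.1 PySem.Dict.empty (fun d => d.modify "points" 0 (· + q.2.getD "points" 0))
  let ts := ts.modify q.1 PySem.Dict.empty (fun d => d.modify "wins" 0 (· + q.2.getD "wins" 0))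
  let ts := ts.modify q.1 PySem.Dict.empty (fun d => d.modify "draws" 0 (· + q.2.getD "draws" 0))
  let ts := ts.modify q.1 PySem.Dict.empty (fun d => d.modify "losses" 0 (· + q.2.getD "losses" 0))
  ts.modify q.1 PySem.Dict.empty (fun d => d.modify "touchdowns" 0 (· + q.2.getD "touchdowns" 0))

def pvSums (psl : List (PySem.Dict String Int)) (k : String) : Int :=
  (psl.map (fun ps => ps.getD k 0)).sum

-- the stats of the players of team t, in player order
def pvPlist (E : List (String × PySem.Dict String Int)) (t : String) : List (PySem.Dict String Int) :=
  (E.filter (fun p => p.1 == t)).map (fun p => p.2)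

theorem pv_foldA (players_dict : List (String × List (String × String)))
    (stats_dict : List (String × List (String × Int))) (init : PySem.Dict String (PySem.Dict String Int)) :
    players_dict.foldl (updateTeamStats_loop stats_dict) init
      = (players_dict.filterMap (pvExt stats_dict)).foldl pvStepA init := by
  induction players_dict generalizing init with
  | nil => rfl
  | cons pp rest ih =>
    simp only [List.foldl_cons, List.filterMap_cons, pvExt]
    cases h : (PySem.Dict.mk pp.2).get? "Team" with
    | none => simp only [updateTeamStats_loop, h]; exact ih _
    | some t =>
      by_cases ht : t = "" <;>
        simp only [updateTeamStats_loop, h, ht, if_true, if_false, List.foldl_cons] <;> exact ih _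

theorem pv_foldB (players_dict : List (String × List (String × String)))
    (stats_dict : List (String × List (String × Int))) (init : PySem.Dict String (List (PySem.Dict String Int))) :
    players_dict.foldl (updateTeamStats_alt_loop stats_dict) init
      = (players_dict.filterMap (pvExt stats_dict)).foldl
          (fun g p => g.modify p.1 [] (fun l => l ++ [p.2])) init := by
  induction players_dict generalizing init with
  | nil => rfl
  | cons pp rest ih =>
    simp only [List.foldl_cons, List.filterMap_cons, pvExt]
    cases h : (PySem.Dict.mk pp.2).get? "Team" with
    | none => simp only [updateTeamStats_alt_loop, h]; exact ih _
    | some t =>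
      by_cases ht : t = "" <;>
        simp only [updateTeamStats_alt_loop, h, ht, if_true, if_false, List.foldl_cons] <;> exact ih _

theorem pvStepA_eq_modify (ts : PySem.Dict String (PySem.Dict String Int)) (q : String × PySem.Dict String Int) :
    pvStepA ts q = ts.modify q.1 pvInitD (fun d => pvAdd d q.2) := by
  cases h : ts.contains q.1 with
  | false =>
    simp only [pvStepA, h, if_neg Bool.false_ne_true, PySem.Dict.modify,
      PySem.Dict.getD_insert_self, PySem.Dict.insert_insert_self, pvAdd,
      PySem.Dict.getD_of_not_contains ts pvInitD h]
  | true =>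
    have hsome : ∃ v, ts.get? q.1 = some v := by
      rw [PySem.Dict.contains_eq_isSome_get?] at h
      exact Option.isSome_iff_exists.mp h
    obtain ⟨v, hv⟩ := hsome
    simp only [pvStepA, h, if_true, PySem.Dict.modify, PySem.Dict.getD_insert_self,
      PySem.Dict.insert_insert_self, pvAdd, PySem.Dict.getD_of_get?_eq_some _ _ hv]

-- a modify-at-key loop whose update depends only on the element: per-key value after the loop
theorem pv_getD_foldl_modify {κ ν β : Type} [BEq κ] [LawfulBEq κ] [DecidableEq κ]
    (l : List (κ × β)) (d0 : ν) (F : β → ν → ν) (d : PySem.Dict κ ν) (c : κ) :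
    (l.foldl (fun d p => d.modify p.1 d0 (F p.2)) d).getD c d0
      = ((l.filter (fun p => p.1 == c)).foldl (fun v p => F p.2 v) (d.getD c d0)) := by
  induction l generalizing d with
  | nil => rfl
  | cons p rest ih =>
    simp only [List.foldl_cons, List.filter_cons]
    by_cases hc : p.1 = c
    · subst hc
      simp [List.foldl_cons, ih]
    · have hb : (p.1 == c) = false := by simp [hc]
      have hcn : ¬ (c = p.1) := fun hh => hc hh.symm
      simp only [hb, if_neg Bool.false_ne_true, ih, PySem.Dict.getD_modify]
      simp [hcn]

theorem pv_fold_add (psl : List (PySem.Dict String Int)) (a b c d e : Int) :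
    psl.foldl pvAdd (PySem.Dict.mk [("points", a), ("touchdowns", b), ("wins", c), ("draws", d), ("losses", e)])
      = PySem.Dict.mk [("points", a + pvSums psl "points"), ("touchdowns", b + pvSums psl "touchdowns"),
          ("wins", c + pvSums psl "wins"), ("draws", d + pvSums psl "draws"), ("losses", e + pvSums psl "losses")] := by
  induction psl generalizing a b c d e with
  | nil => simp [pvSums]
  | cons ps rest ih =>
    have hstep : pvAdd (PySem.Dict.mk [("points", a), ("touchdowns", b), ("wins", c), ("draws", d), ("losses", e)]) ps
        = PySem.Dict.mk [("points", a + ps.getD "points" 0), ("touchdowns", b + ps.getD "touchdowns" 0),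
            ("wins", c + ps.getD "wins" 0), ("draws", d + ps.getD "draws" 0), ("losses", e + ps.getD "losses" 0)] := rfl
    simp only [List.foldl_cons, hstep, ih, pvSums, List.map_cons, List.sum_cons]
    simp [add_assoc]

-- insertion into a mapped list commutes with the map when the order is read through the map
theorem pv_insertBy_map {α β : Type} (f : α → β) (pred : β → β → Bool) (x : α) (acc : List α) :
    PySem.List.insertBy pred (f x) (acc.map f)
      = (PySem.List.insertBy (fun a b => pred (f a) (f b)) x acc).map f := by
  induction acc with
  | nil => rfl
  | cons y ys ih =>
    simp only [List.map_cons, PySem.List.insertBy]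
    by_cases h : pred (f x) (f y) = true <;> simp [h, ih]

theorem pv_sorted_map {α β κ : Type} [LT κ] [DecidableLT κ] (l : List α) (f : α → β) (key : β → κ) :
    PySem.List.sorted (l.map f) key true = (PySem.List.sorted l (fun a => key (f a)) true).map f := by
  rw [PySem.List.sorted_rev_eq_foldl_insertBy, PySem.List.sorted_rev_eq_foldl_insertBy]
  have main : ∀ acc : List α,
      (l.map f).foldl (fun acc x => PySem.List.insertBy (fun a b => decide (key b < key a)) x acc) (acc.map f)
        = (l.foldl (fun acc x => PySem.List.insertBy (fun a b => decide (key (f b) < key (f a))) x acc) acc).map f := by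
    induction l with
    | nil => intro acc; rfl
    | cons x xs ih =>
      intro acc
      simp only [List.map_cons, List.foldl_cons]
      rw [pv_insertBy_map f (fun a b => decide (key b < key a)) x acc]
      exact ih _
  simpa using main []

-- dict() of a list with pairwise-distinct keys keeps the list
theorem pv_items_ofList {ν : Type} (l : List (String × ν)) (h : (l.map Prod.fst).Nodup) :
    (PySem.Dict.ofList l).items = l := by
  have := PySem.Dict.items_foldl_insert_fresh l Prod.fst Prod.snd PySem.Dict.empty
    (fun a _ => PySem.Dict.contains_empty _) h
  simpa [PySem.Dict.ofList, PySem.Dict.update] using this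

-- ===== VERDICT (by name: the statement is the Claim_ definition above) =====
theorem updateTeamStats_spec : Claim_equal_updateTeamStats := by
  intro players_dict stats_dict _
  unfold Spec_updateTeamStats updateTeamStats updateTeamStats_alt
  dsimp only
  rw [pv_foldA, pv_foldB]
  rw [PySem.List.foldl_congr_mem _ pvStepA (fun ts p => ts.modify p.1 pvInitD (fun d => pvAdd d p.2))
    PySem.Dict.empty (fun acc x _ => pvStepA_eq_modify acc x)]
  set E := players_dict.filterMap (pvExt stats_dict) with hE
  set tsA := E.foldl (fun ts p => ts.modify p.1 pvInitD (fun d => pvAdd d p.2)) PySem.Dict.empty with htsA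
  set G := E.foldl (fun g p => g.modify p.1 [] (fun l => l ++ [p.2])) PySem.Dict.empty with hG
  -- keys of both accumulators: the distinct teams in first-appearance order
  have hKA : tsA.keys = PySem.Set.ofList (E.map (fun p => p.1)) := by
    rw [htsA, PySem.Dict.keys_foldl_modify_key E (fun p => p.1) pvInitD (fun _ p => fun d => pvAdd d p.2),
      PySem.Dict.keys_empty, PySem.Set.update_nil_left]
  have hKG : G.keys = PySem.Set.ofList (E.map (fun p => p.1)) := by
    rw [hG, PySem.Dict.keys_foldl_modify_key E (fun p => p.1) [] (fun _ p => fun l => l ++ [p.2]),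
      PySem.Dict.keys_empty, PySem.Set.update_nil_left]
  have hndA : tsA.keys.Nodup := by
    rw [htsA]
    exact PySem.Dict.nodup_keys_foldl_modify_key E (fun p => p.1) pvInitD (fun _ p => fun d => pvAdd d p.2)
      PySem.Dict.empty (by simp [PySem.Dict.keys_empty])
  have hndG : G.keys.Nodup := by
    rw [hG]
    exact PySem.Dict.nodup_keys_foldl_modify_key E (fun p => p.1) [] (fun _ p => fun l => l ++ [p.2])
      PySem.Dict.empty (by simp [PySem.Dict.keys_empty])
  -- per-team values
  have hVA : ∀ t, tsA.getD t pvInitD = PySem.Dict.mk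
      [("points", pvSums (pvPlist E t) "points"), ("touchdowns", pvSums (pvPlist E t) "touchdowns"),
       ("wins", pvSums (pvPlist E t) "wins"), ("draws", pvSums (pvPlist E t) "draws"),
       ("losses", pvSums (pvPlist E t) "losses")] := by
    intro t
    rw [htsA, pv_getD_foldl_modify E pvInitD (fun b => fun d => pvAdd d b) PySem.Dict.empty t,
      PySem.Dict.getD_empty]
    rw [show ((E.filter (fun p => p.1 == t)).foldl (fun v p => pvAdd v p.2) pvInitD)
        = ((E.filter (fun p => p.1 == t)).map (fun p => p.2)).foldl pvAdd pvInitD from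
      List.foldl_map.symm]
    rw [show pvInitD = PySem.Dict.mk [("points", 0), ("touchdowns", 0), ("wins", 0), ("draws", 0), ("losses", 0)] from rfl]
    rw [pv_fold_add]
    simp [pvPlist]
  have hVG : ∀ t, G.getD t [] = pvPlist E t := by
    intro t
    rw [hG, PySem.Dict.getD_foldl_modify_append E PySem.Dict.empty t, PySem.Dict.getD_empty]
    simp [pvPlist]
  -- the two pre-sort lists are images of each other
  have hIA : tsA.items = tsA.keys.map (fun t => (t, tsA.getD t pvInitD)) :=
    PySem.Dict.items_eq_map_keys tsA hndA pvInitD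
  have hIG : G.items = G.keys.map (fun t => (t, G.getD t [])) :=
    PySem.Dict.items_eq_map_keys G hndG []
  have hPB : G.items.map (fun tp => (tp.1,
        ["points", "touchdowns", "wins", "draws", "losses"].map
          (fun k => (k, (tp.2.map (fun ps => ps.getD k 0)).sum))))
      = tsA.items.map (fun p => (p.1, p.2.items)) := by
    rw [hIA, hIG, hKA, hKG, List.map_map, List.map_map]
    apply List.map_congr_left
    intro t _
    simp only [Function.comp_apply, hVA t, hVG t]
    rfl
  rw [hPB]
  rw [pv_sorted_map tsA.items (fun p => (p.1, p.2.items))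
    (fun x => toLex ((PySem.Dict.mk x.2).getD "points" 0, toLex ((PySem.Dict.mk x.2).getD "wins" 0,
      toLex ((PySem.Dict.mk x.2).getD "draws" 0, (PySem.Dict.mk x.2).getD "touchdowns" 0))))]
  have hkey : PySem.List.sorted tsA.items
      (fun a => (fun x : String × List (String × Int) =>
        toLex ((PySem.Dict.mk x.2).getD "points" 0, toLex ((PySem.Dict.mk x.2).getD "wins" 0,
          toLex ((PySem.Dict.mk x.2).getD "draws" 0, (PySem.Dict.mk x.2).getD "touchdowns" 0))))
        ((fun p : String × PySem.Dict String Int => (p.1, p.2.items)) a)) true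
      = PySem.List.sorted tsA.items
        (fun x => toLex (x.2.getD "points" 0, toLex (x.2.getD "wins" 0,
          toLex (x.2.getD "draws" 0, x.2.getD "touchdowns" 0)))) true := rfl
  rw [hkey]
  set SA := PySem.List.sorted tsA.items
    (fun x => toLex (x.2.getD "points" 0, toLex (x.2.getD "wins" 0,
      toLex (x.2.getD "draws" 0, x.2.getD "touchdowns" 0)))) true with hSA
  -- keys stay distinct through the sort
  have hperm : (SA.map Prod.fst).Perm (tsA.items.map Prod.fst) :=
    (PySem.List.sorted_perm _ _ _).map Prod.fst
  have hndSA : (SA.map Prod.fst).Nodup := hperm.nodup_iff.mpr hndA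
  have hndSAf : ((SA.map (fun p => (p.1, p.2.items))).map Prod.fst).Nodup := by
    rw [List.map_map]
    exact hndSA
  rw [pv_items_ofList SA hndSA, pv_items_ofList _ hndSAf]
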